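-- pv_equiv track=rewrite | github.com/docfate111/dice-10000 | app/dicethousand.py | score_die
-- ===== SOURCE A (Python) =====
-- from collections import Counter
--
-- def score_die(dice: list) -> tuple:
--     """
--     return the score of the dice and dice remaining
--     """
--     pts = 0
--     # check for triples
--     c = Counter(dice)
--     triples = []
--     seen = set()
--     for i, j in c.items():
--         if j >= 3:
--             triples.append(i)
--             if i not in seen:
--                 if i == 1:
--                     pts += 1000
--                 else:
--                     pts += i * 100
--             seen.add(i)
--     for elem in triples:
--         for i in range(3):
--             dice.remove(elem)
--     rest = []
--     while 1 in dice or 5 in dice: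
--         if dice[-1] == 1:
--             pts += 100
--             dice.pop()
--         elif dice[-1] == 5:
--             pts += 50
--             dice.pop()
--         else:
--             rest.append(dice.pop())
--     return (pts, len(rest) + len(dice))
-- ===== SOURCE B (Python) =====
-- from collections import Counter
--
-- def score_die(dice: list) -> tuple:
--     """Score by counting alone (single Counter pass + arithmetic); does not
--     mutate dice, whereas A truncates it in place — return value is identical."""
--     c = Counter(dice)
--     pts = sum(1000 if v == 1 else v * 100 for v, n in c.items() if n >= 3)
--     triples = sum(1 for n in c.values() if n >= 3)
--     k1 = c[1] - 3 if c[1] >= 3 else c[1]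
--     k5 = c[5] - 3 if c[5] >= 3 else c[5]
--     return (pts + 100 * k1 + 50 * k5, len(dice) - 3 * triples - k1 - k5)
-- ===== Notes on version B (the rewrite author's own statement) =====
-- stated objective: faster
-- what changed: B computes the score and remaining-die count purely arithmetically from one Counter (counts of 1s/5s minus 3 per detected triple), replacing A's in-place triple removal via repeated list.remove and the repeated-membership tail-popping while loop; B does not mutate dice (the return value is identical).
import Mathlib
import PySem

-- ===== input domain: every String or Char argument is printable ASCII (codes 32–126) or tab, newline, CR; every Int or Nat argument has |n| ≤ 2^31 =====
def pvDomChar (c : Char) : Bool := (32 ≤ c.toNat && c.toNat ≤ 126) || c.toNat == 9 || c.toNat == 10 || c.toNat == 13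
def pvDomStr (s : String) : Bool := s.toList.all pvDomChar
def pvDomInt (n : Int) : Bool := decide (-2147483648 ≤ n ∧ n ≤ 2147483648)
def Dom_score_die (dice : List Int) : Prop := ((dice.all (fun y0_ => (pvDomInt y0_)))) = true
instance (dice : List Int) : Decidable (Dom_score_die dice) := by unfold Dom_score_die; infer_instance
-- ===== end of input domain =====

-- B changes the algorithm: score from one Counter by arithmetic, no list mutation
-- (A truncates `dice` in place; the equivalence proved is about the RETURN value only).

-- ===== PORT A =====

-- dice.remove(elem): Python raises ValueError when absent; in A every removed elem has
-- count ≥ 3 at that moment, so the `.getD d` (none) branch is unreachable (proved below).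
def pyRemove (d : List Int) (e : Int) : List Int := (PySem.List.remove? d e).getD d

-- the body of `for i, j in c.items(): ...` (triple detection; st = (pts, triples, seen))
def tripStep (st : Int × List Int × PySem.Set Int) (p : Int × Int) : Int × List Int × PySem.Set Int :=
  if 3 ≤ p.2 then
    ((if ¬ (PySem.Set.contains st.2.2 p.1 = true) then
        (if p.1 = 1 then st.1 + 1000 else st.1 + p.1 * 100)
      else st.1),
     st.2.1 ++ [p.1], PySem.Set.add st.2.2 p.1)
  else st

-- the `while 1 in dice or 5 in dice:` loop; rest and dice carried as in Python
def scoreLoopA (pts : Int) (rest : List Int) (dice : List Int) : Int × Int :=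
  if (1 : Int) ∈ dice ∨ (5 : Int) ∈ dice then
    match h : dice.getLast? with
    | some last =>
      if last = 1 then scoreLoopA (pts + 100) rest dice.dropLast
      else if last = 5 then scoreLoopA (pts + 50) rest dice.dropLast
      else scoreLoopA pts (rest ++ [last]) dice.dropLast
    | none => (pts, (rest.length : Int) + (dice.length : Int))  -- unreachable: dice ≠ []
  else (pts, (rest.length : Int) + (dice.length : Int))
termination_by dice.length
decreasing_by
  all_goals
    have hne : dice ≠ [] := by intro hnil; rw [hnil] at h; simp at h
    have hpos : 0 < dice.length := List.length_pos_of_ne_nil hne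
    simp only [List.length_dropLast]
    omega

def score_die (dice : List Int) : Int × Int :=
  let c := PySem.Dict.counter dice
  let st := c.items.foldl tripStep (0, [], PySem.Set.empty)
  let dice2 := st.2.1.foldl (fun d e => (PySem.List.pyRange 0 3 1).foldl (fun d _ => pyRemove d e) d) dice
  scoreLoopA st.1 [] dice2

-- ===== PORT B =====
def score_die_alt (dice : List Int) : Int × Int :=
  let c := PySem.Dict.counter dice
  let pts := ((c.items.filter (fun p => decide (3 ≤ p.2))).map
                (fun p => if p.1 = 1 then (1000 : Int) else p.1 * 100)).sum
  let triples := ((c.values.filter (fun n => decide (3 ≤ n))).map (fun _ => (1 : Int))).sum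
  let k1 := if 3 ≤ c.getD 1 0 then c.getD 1 0 - 3 else c.getD 1 0
  let k5 := if 3 ≤ c.getD 5 0 then c.getD 5 0 - 3 else c.getD 5 0
  (pts + 100 * k1 + 50 * k5, (dice.length : Int) - 3 * triples - k1 - k5)

-- ===== PRECONDITION & SPEC =====
def Spec_score_die (dice : List Int) (out : Int × Int) : Prop := out = score_die_alt dice
instance (dice : List Int) (out : Int × Int) : Decidable (Spec_score_die dice out) := by unfold Spec_score_die; infer_instance

-- ===== CLAIM (what is proved, stated in full; the proofs are below) =====
def Claim_equal_score_die : Prop := ∀ (dice : List Int), Dom_score_die dice → Spec_score_die dice (score_die dice)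

-- ===== LEMMAS AND PROOFS =====

-- Phase 1 of A over keys with fresh `seen`: pts is the filtered sum, triples the filtered keys.
theorem phase1_fold (cnt : Int → Int) (l : List Int) (pts : Int) (tr : List Int)
    (seen : PySem.Set Int) (hfresh : ∀ k ∈ l, ¬ (PySem.Set.contains seen k = true))
    (hnd : l.Nodup) :
    ∃ seen', (l.map (fun k => (k, cnt k))).foldl tripStep (pts, tr, seen)
      = (pts + ((l.filter (fun k => decide (3 ≤ cnt k))).map
                  (fun k => if k = 1 then (1000 : Int) else k * 100)).sum,
         tr ++ l.filter (fun k => decide (3 ≤ cnt k)), seen') := by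
  induction l generalizing pts tr seen with
  | nil => exact ⟨seen, by simp⟩
  | cons k l ih =>
    have hk : ¬ (PySem.Set.contains seen k = true) := hfresh k (by simp)
    have hfresh' : ∀ k' ∈ l, ¬ (PySem.Set.contains (PySem.Set.add seen k) k' = true) := by
      intro k' hk'
      rw [PySem.Set.contains_iff, PySem.Set.mem_add]
      rintro (hmem | rfl)
      · exact hfresh k' (by simp [hk']) ((PySem.Set.contains_iff seen k').mpr hmem)
      · exact (List.nodup_cons.mp hnd).1 hk'
    by_cases h3 : 3 ≤ cnt k
    · obtain ⟨seen', hs⟩ := ih (pts + (if k = 1 then 1000 else k * 100)) (tr ++ [k])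
        (PySem.Set.add seen k) hfresh' (List.nodup_cons.mp hnd).2
      refine ⟨seen', ?_⟩
      have hstep : tripStep (pts, tr, seen) (k, cnt k)
          = (pts + (if k = 1 then 1000 else k * 100), tr ++ [k], PySem.Set.add seen k) := by
        simp only [tripStep]
        rw [if_pos h3, if_pos hk]
        by_cases h1 : k = 1 <;> simp [h1]
      simp only [List.map_cons, List.foldl_cons, hstep, hs]
      simp [h3]
      ring
    · obtain ⟨seen', hs⟩ := ih pts tr seen (fun k' hk' => hfresh k' (by simp [hk'])) (List.nodup_cons.mp hnd).2
      refine ⟨seen', ?_⟩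
      have hstep : tripStep (pts, tr, seen) (k, cnt k) = (pts, tr, seen) := by
        simp only [tripStep, if_neg h3]
      simp only [List.map_cons, List.foldl_cons, hstep, hs]
      simp [h3]

theorem count_pyRemove (d : List Int) (e v : Int) (he : e ∈ d) :
    (pyRemove d e).count v = d.count v - (if e = v then 1 else 0) := by
  unfold pyRemove
  rw [PySem.List.remove?_eq_some_erase d e he]
  simp [List.count_erase]

theorem length_pyRemove (d : List Int) (e : Int) (he : e ∈ d) :
    (pyRemove d e).length = d.length - 1 := by
  unfold pyRemove
  rw [PySem.List.remove?_eq_some_erase d e he]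
  simp [List.length_erase_of_mem he]

-- one elem removed three times
theorem removeThrice (d : List Int) (e v : Int) (he : 3 ≤ d.count e) :
    ((PySem.List.pyRange 0 3 1).foldl (fun d _ => pyRemove d e) d).count v
      = d.count v - (if e = v then 3 else 0) := by
  have h3 : PySem.List.pyRange 0 3 1 = [0, 1, 2] := by decide
  have he0 : e ∈ d := List.count_pos_iff.mp (by omega)
  have hc1 := count_pyRemove d e e he0
  have he1 : e ∈ pyRemove d e := List.count_pos_iff.mp (by simp at hc1; omega)
  have hc2 := count_pyRemove (pyRemove d e) e e he1
  have he2 : e ∈ pyRemove (pyRemove d e) e := List.count_pos_iff.mp (by simp at hc1 hc2; omega)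
  rw [h3]
  simp only [List.foldl_cons, List.foldl_nil]
  rw [count_pyRemove _ e v he2, count_pyRemove _ e v he1, count_pyRemove d e v he0]
  simp at hc1
  split_ifs with hev
  · subst hev; omega
  · omega

theorem removeThrice_len (d : List Int) (e : Int) (he : 3 ≤ d.count e) :
    ((PySem.List.pyRange 0 3 1).foldl (fun d _ => pyRemove d e) d).length = d.length - 3 := by
  have h3 : PySem.List.pyRange 0 3 1 = [0, 1, 2] := by decide
  have he0 : e ∈ d := List.count_pos_iff.mp (by omega)
  have hc1 := count_pyRemove d e e he0
  have he1 : e ∈ pyRemove d e := List.count_pos_iff.mp (by simp at hc1; omega)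
  have hc2 := count_pyRemove (pyRemove d e) e e he1
  have he2 : e ∈ pyRemove (pyRemove d e) e := List.count_pos_iff.mp (by simp at hc1 hc2; omega)
  have hl0 : 1 ≤ d.length := List.length_pos_of_ne_nil (List.ne_nil_of_mem he0)
  rw [h3]
  simp only [List.foldl_cons, List.foldl_nil]
  rw [length_pyRemove _ e he2, length_pyRemove _ e he1, length_pyRemove d e he0]
  omega

-- the full removal loop over distinct triple values (stated over Int to avoid truncation)
theorem removal_fold (tr : List Int) (d : List Int) (hnd : tr.Nodup)
    (hcnt : ∀ e ∈ tr, 3 ≤ d.count e) :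
    (∀ v, (((tr.foldl (fun d e => (PySem.List.pyRange 0 3 1).foldl (fun d _ => pyRemove d e) d) d).count v : Int))
        = (d.count v : Int) - (if v ∈ tr then 3 else 0))
    ∧ (((tr.foldl (fun d e => (PySem.List.pyRange 0 3 1).foldl (fun d _ => pyRemove d e) d) d).length : Int))
        = (d.length : Int) - 3 * tr.length := by
  induction tr generalizing d with
  | nil => simp
  | cons e tr ih =>
    have hce : 3 ≤ d.count e := hcnt e (by simp)
    have hlen : 3 ≤ d.length := le_trans hce (List.count_le_length)
    have hcv : ∀ v, ((PySem.List.pyRange 0 3 1).foldl (fun d _ => pyRemove d e) d).count v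
        = d.count v - (if e = v then 3 else 0) := fun v => removeThrice d e v hce
    have hlv : ((PySem.List.pyRange 0 3 1).foldl (fun d _ => pyRemove d e) d).length
        = d.length - 3 := removeThrice_len d e hce
    have hcnt' : ∀ e' ∈ tr, 3 ≤ ((PySem.List.pyRange 0 3 1).foldl (fun d _ => pyRemove d e) d).count e' := by
      intro e' he'
      rw [hcv e']
      have hne : ¬ e = e' := by rintro rfl; exact (List.nodup_cons.mp hnd).1 he'
      rw [if_neg hne]
      simpa using hcnt e' (by simp [he'])
    obtain ⟨ihc, ihl⟩ := ih _ (List.nodup_cons.mp hnd).2 hcnt'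
    refine ⟨fun v => ?_, ?_⟩
    · simp only [List.foldl_cons]
      rw [ihc v, hcv v]
      by_cases hv : e = v
      · subst hv
        have hnv : e ∉ tr := (List.nodup_cons.mp hnd).1
        rw [if_pos rfl, if_neg hnv, if_pos (List.mem_cons_self)]
        omega
      · rw [if_neg hv]
        by_cases hm : v ∈ tr
        · rw [if_pos hm, if_pos (List.mem_cons_of_mem _ hm)]; omega
        · rw [if_neg hm, if_neg (by
            intro h
            rcases List.mem_cons.mp h with h' | h'
            · exact hv h'.symm
            · exact hm h')]
          omega
    · simp only [List.foldl_cons]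
      rw [ihl, hlv]
      simp only [List.length_cons]
      push_cast
      omega

-- the while loop in closed form
theorem scoreLoopA_eq (d : List Int) (pts : Int) (rest : List Int) :
    scoreLoopA pts rest d
      = (pts + 100 * d.count 1 + 50 * d.count 5,
         (rest.length : Int) + (d.length : Int) - d.count 1 - d.count 5) := by
  induction d using List.reverseRecOn generalizing pts rest with
  | nil =>
    rw [scoreLoopA]
    simp
  | append_singleton ds a ih =>
    rw [scoreLoopA]
    by_cases hc : (1 : Int) ∈ ds ++ [a] ∨ (5 : Int) ∈ ds ++ [a]
    · rw [if_pos hc]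
      split
      case _ last heq =>
        have ha : last = a := by
          rw [List.getLast?_concat] at heq
          exact (Option.some_inj.mp heq).symm
        rw [ha, List.dropLast_concat]
        by_cases h1 : a = 1
        · rw [if_pos h1, ih]
          subst h1
          simp [List.count_append, List.length_append]
          constructor
          · ring
          · ring
        · rw [if_neg h1]
          by_cases h5 : a = 5
          · rw [if_pos h5, ih]
            subst h5
            simp [List.count_append, List.length_append, h1]
            constructor
            · ring
            · ring
          · rw [if_neg h5, ih]
            simp [List.count_append, List.length_append, h1, h5]
            ring
      case _ heq =>
        rw [List.getLast?_concat] at heq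
        exact absurd heq (by simp)
    · rw [if_neg hc]
      push Not at hc
      have h1 : (ds ++ [a]).count 1 = 0 := List.count_eq_zero.mpr hc.1
      have h5 : (ds ++ [a]).count 5 = 0 := List.count_eq_zero.mpr hc.2
      rw [h1, h5]
      simp

-- ===== VERDICT (by name: the statement is the Claim_ definition above) =====
theorem score_die_spec : Claim_equal_score_die := by
  unfold Claim_equal_score_die
  intro dice _
  unfold Spec_score_die score_die score_die_alt
  simp only [PySem.Dict.items_counter, PySem.Dict.getD_counter]
  obtain ⟨seen', hfold⟩ := phase1_fold (fun k => (dice.count k : Int)) (PySem.Set.ofList dice)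
      0 [] PySem.Set.empty
      (fun k _ => by simp [PySem.Set.empty])
      (PySem.Set.nodup_ofList dice)
  rw [hfold]
  dsimp only
  simp only [zero_add, List.nil_append]
  set tr := (PySem.Set.ofList dice).filter (fun k => decide (3 ≤ (dice.count k : Int))) with htr
  have hcnt3 : ∀ e ∈ tr, 3 ≤ dice.count e := by
    intro e he
    have h := (List.mem_filter.mp he).2
    rw [decide_eq_true_iff] at h
    exact_mod_cast h
  have hndtr : tr.Nodup := (PySem.Set.nodup_ofList dice).filter _
  obtain ⟨hrc, hrl⟩ := removal_fold tr dice hndtr hcnt3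
  rw [scoreLoopA_eq]
  have hmem : ∀ v : Int, (v ∈ tr) ↔ 3 ≤ dice.count v := by
    intro v
    constructor
    · exact fun hv => hcnt3 v hv
    · intro hv
      rw [htr, List.mem_filter]
      refine ⟨(PySem.Set.mem_ofList dice v).mpr (List.count_pos_iff.mp (by omega)), ?_⟩
      rw [decide_eq_true_iff]
      exact_mod_cast hv
  -- B's generator sum equals A's phase-1 pts
  have hpts : ((((PySem.Set.ofList dice).map (fun k => (k, (dice.count k : Int)))).filter
        (fun p => decide (3 ≤ p.2))).map (fun p => if p.1 = 1 then (1000 : Int) else p.1 * 100)).sum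
      = (tr.map (fun k => if k = 1 then (1000 : Int) else k * 100)).sum := by
    rw [List.filter_map, List.map_map, htr]
    rfl
  -- B's triples count equals tr.length
  have htrip : (((PySem.Dict.counter dice).values.filter (fun n => decide (3 ≤ n))).map
        (fun _ => (1 : Int))).sum = (tr.length : Int) := by
    have hv : (PySem.Dict.counter dice).values
        = ((PySem.Set.ofList dice).map (fun k => (k, (dice.count k : Int)))).map (fun p => p.2) := by
      rw [← PySem.Dict.items_counter]; rfl
    rw [hv, List.map_map, List.filter_map, List.map_map]
    rw [show ((fun n : Int => decide (3 ≤ n)) ∘ (fun p : Int × Int => p.2) ∘ fun k => (k, (dice.count k : Int)))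
        = (fun k : Int => decide (3 ≤ (dice.count k : Int))) from rfl, ← htr]
    rw [show ((fun _ : Int => (1 : Int)) ∘ (fun p : Int × Int => p.2) ∘ fun k => (k, (dice.count k : Int)))
        = (fun _ : Int => (1 : Int)) from rfl]
    simp [List.map_const']
  rw [htrip, hpts]
  have h1c := hrc 1
  have h5c := hrc 5
  have hm1 := hmem 1
  have hm5 := hmem 5
  have hc1 : ((3:Int) ≤ (dice.count 1 : Int)) ↔ 3 ≤ dice.count 1 := by exact_mod_cast Iff.rfl
  have hc5 : ((3:Int) ≤ (dice.count 5 : Int)) ↔ 3 ≤ dice.count 5 := by exact_mod_cast Iff.rfl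
  refine Prod.ext ?_ ?_
  · dsimp only
    rw [h1c, h5c]
    by_cases h1 : 3 ≤ dice.count 1 <;> by_cases h5 : 3 ≤ dice.count 5
    · rw [if_pos (hm1.mpr h1), if_pos (hm5.mpr h5), if_pos (hc1.mpr h1), if_pos (hc5.mpr h5)]
    · rw [if_pos (hm1.mpr h1), if_neg (fun h => h5 (hm5.mp h)), if_pos (hc1.mpr h1),
        if_neg (fun h => h5 (hc5.mp h))]
      ring
    · rw [if_neg (fun h => h1 (hm1.mp h)), if_pos (hm5.mpr h5), if_neg (fun h => h1 (hc1.mp h)),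
        if_pos (hc5.mpr h5)]
      ring
    · rw [if_neg (fun h => h1 (hm1.mp h)), if_neg (fun h => h5 (hm5.mp h)),
        if_neg (fun h => h1 (hc1.mp h)), if_neg (fun h => h5 (hc5.mp h))]
      ring
  · dsimp only
    simp only [List.length_nil, Nat.cast_zero]
    rw [hrl, h1c, h5c]
    by_cases h1 : 3 ≤ dice.count 1 <;> by_cases h5 : 3 ≤ dice.count 5
    · rw [if_pos (hm1.mpr h1), if_pos (hm5.mpr h5), if_pos (hc1.mpr h1), if_pos (hc5.mpr h5)]
      ring
    · rw [if_pos (hm1.mpr h1), if_neg (fun h => h5 (hm5.mp h)), if_pos (hc1.mpr h1),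
        if_neg (fun h => h5 (hc5.mp h))]
      ring
    · rw [if_neg (fun h => h1 (hm1.mp h)), if_pos (hm5.mpr h5), if_neg (fun h => h1 (hc1.mp h)),
        if_pos (hc5.mpr h5)]
      ring
    · rw [if_neg (fun h => h1 (hm1.mp h)), if_neg (fun h => h5 (hm5.mp h)),
        if_neg (fun h => h1 (hc1.mp h)), if_neg (fun h => h5 (hc5.mp h))]
      ring
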